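-- pv_equiv track=rewrite | github.com/Devrockzz654/YogaPoseFusion | backend/models/recommendations.py | _primary_family
-- ===== SOURCE A (Python) =====
-- def _primary_family(pose: dict) -> str:
--     priority = [
--         "restorative",
--         "balance",
--         "standing",
--         "forward_fold",
--         "twist",
--         "backbend",
--         "hip_opener",
--         "core",
--         "arm_balance",
--         "inversion",
--         "seated",
--         "supine",
--         "kneeling",
--         "prone",
--         "shoulder_opener",
--         "posture",
--     ]
--     families = pose.get("movement_families", [])
--     for family in priority:
--         if family in families:
--             return family
--     return families[0] if families else "general"
-- ===== SOURCE B (Python) =====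
-- def _primary_family(pose: dict) -> str:
--     rank = {
--         "restorative": 0, "balance": 1, "standing": 2, "forward_fold": 3,
--         "twist": 4, "backbend": 5, "hip_opener": 6, "core": 7,
--         "arm_balance": 8, "inversion": 9, "seated": 10, "supine": 11,
--         "kneeling": 12, "prone": 13, "shoulder_opener": 14, "posture": 15,
--     }
--     families = pose.get("movement_families", [])
--     sentinel = len(rank)
--     best, best_rank = None, sentinel
--     for family in families:
--         r = rank.get(family, sentinel)
--         if r < best_rank:
--             best, best_rank = family, r
--     if best is not None:
--         return best
--     return families[0] if families else "general"
-- ===== Notes on version B (the rewrite author's own statement) =====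
-- stated objective: alternative
-- what changed: A scans the fixed priority list and returns the first entry that occurs in the pose's families; B instead makes one pass over the families themselves, keeping the best-ranked family seen so far against a hardcoded rank table (priority name -> index), with the same fallback (families[0] or 'general') when no family is ranked.
import Mathlib
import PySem

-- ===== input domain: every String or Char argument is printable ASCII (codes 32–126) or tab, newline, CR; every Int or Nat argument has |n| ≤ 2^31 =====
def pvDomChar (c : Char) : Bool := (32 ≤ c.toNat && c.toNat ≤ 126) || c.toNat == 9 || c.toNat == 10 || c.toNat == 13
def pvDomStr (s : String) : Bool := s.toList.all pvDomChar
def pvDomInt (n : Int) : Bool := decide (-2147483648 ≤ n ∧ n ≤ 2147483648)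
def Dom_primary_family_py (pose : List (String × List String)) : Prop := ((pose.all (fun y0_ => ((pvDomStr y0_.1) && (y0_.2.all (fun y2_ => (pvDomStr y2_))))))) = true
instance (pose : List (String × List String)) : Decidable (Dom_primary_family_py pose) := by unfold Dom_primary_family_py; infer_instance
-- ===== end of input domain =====

-- B replaces A's first-match scan over the priority list by a single best-so-far pass over the
-- pose's families against a hardcoded rank table (alternative decomposition, same result).

-- ===== PORT A =====
def pvPriorityA : List String :=
  ["restorative", "balance", "standing", "forward_fold", "twist", "backbend",
   "hip_opener", "core", "arm_balance", "inversion", "seated", "supine",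
   "kneeling", "prone", "shoulder_opener", "posture"]

def primary_family_py (pose : List (String × List String)) : String :=
  let families := PySem.Dict.getD ⟨pose⟩ "movement_families" []
  match pvPriorityA.find? (fun family => families.contains family) with
  | some family => family
  | none =>
    match families with
    | [] => "general"
    | f :: _ => f

-- ===== PORT B =====
-- rank = {"restorative": 0, …, "posture": 15}  (literal dict)
def pvRank : PySem.Dict String Int :=
  ⟨[("restorative", 0), ("balance", 1), ("standing", 2), ("forward_fold", 3),
    ("twist", 4), ("backbend", 5), ("hip_opener", 6), ("core", 7),
    ("arm_balance", 8), ("inversion", 9), ("seated", 10), ("supine", 11),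
    ("kneeling", 12), ("prone", 13), ("shoulder_opener", 14), ("posture", 15)]⟩

def primary_family_py_alt (pose : List (String × List String)) : String :=
  let families := PySem.Dict.getD ⟨pose⟩ "movement_families" []
  let sentinel : Int := (pvRank.size : Int)
  -- best, best_rank = None, sentinel; for family in families: …
  let st := families.foldl
    (fun (st : Option String × Int) family =>
      let r := pvRank.getD family sentinel
      if r < st.2 then (some family, r) else st)
    (none, sentinel)
  match st.1 with
  | some best => best
  | none =>
    match families with
    | [] => "general"
    | f :: _ => f

-- ===== PRECONDITION & SPEC =====
def Spec_primary_family_py (pose : List (String × List String)) (out : String) : Prop := out = primary_family_py_alt pose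
instance (pose : List (String × List String)) (out : String) : Decidable (Spec_primary_family_py pose out) := by unfold Spec_primary_family_py; infer_instance

-- ===== CLAIM (what is proved, stated in full; the proofs are below) =====
def Claim_equal_primary_family_py : Prop := ∀ (pose : List (String × List String)), Dom_primary_family_py pose → Spec_primary_family_py pose (primary_family_py pose)

-- ===== LEMMAS AND PROOFS =====

-- the fold building a rank dict maps each member of a duplicate-free list to its index (offset by s)
lemma pv_rank_build (xs : List String) (s : Int) (d : PySem.Dict String Int)
    (hnd : xs.Nodup) (hd : ∀ x ∈ xs, d.get? x = none) (f : String) :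
    ((PySem.List.enumerate xs s).foldl (fun d p => d.insert p.2 p.1) d).get? f
      = if f ∈ xs then some (s + (xs.idxOf f : Int)) else d.get? f := by
  induction xs generalizing s d with
  | nil => simp [PySem.List.enumerate_nil]
  | cons x t ih =>
    rw [PySem.List.enumerate_cons]
    simp only [List.foldl_cons]
    have hxt : x ∉ t := (List.nodup_cons.mp hnd).1
    have ih' := ih (s + 1) (d.insert x s) (List.nodup_cons.mp hnd).2
      (fun y hy => by
        rw [PySem.Dict.get?_insert_of_ne d s (fun h : y = x => hxt (h ▸ hy))]
        exact hd y (List.mem_cons_of_mem _ hy))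
    rw [ih']
    by_cases hft : f ∈ t
    · have hfx : f ≠ x := fun h => hxt (h ▸ hft)
      rw [if_pos hft, if_pos (List.mem_cons_of_mem _ hft), List.idxOf_cons_ne _ (Ne.symm hfx)]
      push_cast; ring_nf
    · by_cases hfx : f = x
      · subst hfx
        rw [if_neg hft, if_pos (List.mem_cons_self), PySem.Dict.get?_insert_self,
          List.idxOf_cons_self]
        simp
      · rw [if_neg hft, if_neg (by simp [hfx, hft]),
          PySem.Dict.get?_insert_of_ne d s (Ne.symm (fun h => hfx h.symm))]

-- the literal rank dict IS the dict built from enumerate(priority) — both are closed values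
lemma pv_rank_eq_build :
    pvRank = (PySem.List.enumerate pvPriorityA 0).foldl (fun d p => d.insert p.2 p.1) ⟨[]⟩ := by
  decide

-- rank.get f = index of f in the priority list
lemma pv_rank_get? (f : String) :
    pvRank.get? f = if f ∈ pvPriorityA then some ((pvPriorityA.idxOf f : Int)) else none := by
  rw [pv_rank_eq_build, pv_rank_build pvPriorityA 0 ⟨[]⟩ (by decide) (fun x _ => rfl) f]
  split <;> first | simp | rfl

-- rank.get(f, 16) as an if over the priority list
lemma pv_rank_getD (f : String) :
    pvRank.getD f ((pvRank.size : Int))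
      = if f ∈ pvPriorityA then ((pvPriorityA.idxOf f : Int)) else 16 := by
  rw [PySem.Dict.getD_eq_get?_getD, pv_rank_get?]
  split <;> rfl

-- min? only looks at the key values of the members
lemma pv_min?_key_congr_aux {α : Type} (xs : List α) (k1 k2 : α → Int)
    (h : ∀ x ∈ xs, k1 x = k2 x) (acc : Option α) (hacc : ∀ m, acc = some m → k1 m = k2 m) :
    xs.foldl (fun acc x => match acc with
      | none => some x
      | some m => if k1 x < k1 m then some x else some m) acc
    = xs.foldl (fun acc x => match acc with
      | none => some x
      | some m => if k2 x < k2 m then some x else some m) acc := by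
  induction xs generalizing acc with
  | nil => rfl
  | cons x t ih =>
    simp only [List.foldl_cons]
    have hx := h x (List.mem_cons_self)
    have ht : ∀ y ∈ t, k1 y = k2 y := fun y hy => h y (List.mem_cons_of_mem _ hy)
    cases acc with
    | none => exact ih ht _ (fun m hm => by cases hm; exact hx)
    | some m =>
      have hm := hacc m rfl
      dsimp only
      rw [hx, hm]
      split <;> exact ih ht _ (fun m' hm' => by cases hm'; first | exact hx | exact hm)

lemma pv_min?_key_congr {α : Type} (xs : List α) (k1 k2 : α → Int)
    (h : ∀ x ∈ xs, k1 x = k2 x) : PySem.List.min? xs k1 = PySem.List.min? xs k2 :=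
  pv_min?_key_congr_aux xs k1 k2 h none (by simp)

-- B's best-so-far pass = min? over the families that carry a key value below the sentinel
lemma pv_fold_eq_min_aux (k : String → Int) (n : Int) (fams : List String)
    (b : Option String) (r : Int)
    (hbr : (b = none ∧ r = n) ∨ ∃ m, b = some m ∧ r = k m ∧ k m < n) :
    (fams.foldl (fun st f => if k f < st.2 then (some f, k f) else st) (b, r)).1
      = (fams.filter (fun f => decide (k f < n))).foldl
          (fun acc x => match acc with
            | none => some x
            | some m => if k x < k m then some x else some m) b := by
  induction fams generalizing b r with
  | nil =>
    rcases hbr with ⟨hb, _⟩ | ⟨m, hb, _, _⟩ <;> subst hb <;> rfl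
  | cons f t ih =>
    simp only [List.foldl_cons, List.filter_cons]
    rcases hbr with ⟨hb, hr⟩ | ⟨m, hb, hr, hmn⟩
    · subst hb; rw [hr]
      by_cases hf : k f < n
      · rw [if_pos hf, if_pos (by simpa using hf)]
        simpa using ih (some f) (k f) (Or.inr ⟨f, rfl, rfl, hf⟩)
      · rw [if_neg hf, if_neg (by simpa using hf)]
        exact ih none n (Or.inl ⟨rfl, rfl⟩)
    · subst hb; rw [hr]
      by_cases hfm : k f < k m
      · have hfn : k f < n := lt_trans hfm hmn
        rw [if_pos hfm, if_pos (by simpa using hfn)]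
        simpa [hfm] using ih (some f) (k f) (Or.inr ⟨f, rfl, rfl, hfn⟩)
      · rw [if_neg hfm]
        by_cases hfn : k f < n
        · rw [if_pos (by simpa using hfn)]
          simpa [hfm] using ih (some m) (k m) (Or.inr ⟨m, rfl, rfl, hmn⟩)
        · rw [if_neg (by simpa using hfn)]
          exact ih (some m) (k m) (Or.inr ⟨m, rfl, rfl, hmn⟩)

lemma pv_fold_eq_min (k : String → Int) (n : Int) (fams : List String) :
    (fams.foldl (fun st f => if k f < st.2 then (some f, k f) else st) (none, n)).1
      = PySem.List.min? (fams.filter (fun f => decide (k f < n))) k := by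
  unfold PySem.List.min?
  refine (pv_fold_eq_min_aux k n fams none n (Or.inl ⟨rfl, rfl⟩)).trans ?_
  congr 1
  funext acc x
  cases acc <;> rfl

-- the heart: first-match over the priority list = min-by-index over the matching families
lemma pv_find_eq_min (prio fams : List String) (hnd : prio.Nodup) :
    prio.find? (fun f => fams.contains f)
      = PySem.List.min? (fams.filter (fun f => decide (f ∈ prio)))
          (fun f => (prio.idxOf f : Int)) := by
  cases h : prio.find? (fun f => fams.contains f) with
  | none =>
    rw [List.find?_eq_none] at h
    have hfil : fams.filter (fun f => decide (f ∈ prio)) = [] := by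
      rw [List.filter_eq_nil_iff]
      intro a ha hap
      have := h a (by simpa using hap)
      simp at this
      exact this ha
    rw [hfil]
    rfl
  | some r =>
    obtain ⟨hpr, as, bs, hsplit, has⟩ := List.find?_eq_some_iff_append.mp h
    have hrf : r ∈ fams := by simpa using hpr
    have hrC : r ∈ fams.filter (fun f => decide (f ∈ prio)) := by
      simp [List.mem_filter, hrf, hsplit]
    cases hm : PySem.List.min? (fams.filter (fun f => decide (f ∈ prio)))
        (fun f => (prio.idxOf f : Int)) with
    | none =>
      rw [PySem.List.min?_eq_none_iff] at hm
      rw [hm] at hrC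
      exact absurd hrC (List.not_mem_nil)
    | some m =>
      have hmC := PySem.List.min?_mem hm
      have hmin := PySem.List.min?_isMin hm r hrC
      have hmf : m ∈ fams := (List.mem_filter.mp hmC).1
      have hmp : m ∈ prio := by simpa using (List.mem_filter.mp hmC).2
      have hras : r ∉ as := by
        intro hr
        have := has r hr
        simp at this
        exact this hrf
      have hidxr : prio.idxOf r = as.length := by
        rw [hsplit, List.idxOf_append_of_notMem hras, List.idxOf_cons_self]
        omega
      have hmas : m ∉ as := by
        intro hma
        have := has m hma
        simp at this
        exact this hmf
      have : m = r := by
        rcases (by rw [hsplit] at hmp; simpa using hmp :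
            m ∈ as ∨ m = r ∨ m ∈ bs) with h1 | h2 | h3
        · exact absurd h1 hmas
        · exact h2
        · exfalso
          have hmr : m ≠ r := by
            intro he
            have hnd' := hsplit ▸ hnd
            rw [List.nodup_append] at hnd'
            exact (List.nodup_cons.mp hnd'.2.1).1 (he ▸ h3)
          have hidxm : prio.idxOf m = as.length + (bs.idxOf m + 1) := by
            rw [hsplit, List.idxOf_append_of_notMem hmas, List.idxOf_cons_ne _ (Ne.symm hmr)]
          have : (prio.idxOf m : Int) ≤ (prio.idxOf r : Int) := hmin
          rw [hidxr, hidxm] at this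
          omega
      rw [this]

lemma pv_core (fams : List String) :
    (match pvPriorityA.find? (fun family => fams.contains family) with
     | some family => family
     | none => match fams with | [] => "general" | f :: _ => f)
    = (match (fams.foldl
          (fun (st : Option String × Int) family =>
            if pvRank.getD family ((pvRank.size : Int)) < st.2
            then (some family, pvRank.getD family ((pvRank.size : Int))) else st)
          (none, (pvRank.size : Int))).1 with
       | some best => best
       | none => match fams with | [] => "general" | f :: _ => f) := by
  have hsz : ((pvRank.size : Int)) = 16 := by decide
  have hfold : (fams.foldl
        (fun (st : Option String × Int) family =>
          if pvRank.getD family ((pvRank.size : Int)) < st.2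
          then (some family, pvRank.getD family ((pvRank.size : Int))) else st)
        (none, (pvRank.size : Int))).1
      = PySem.List.min?
          (fams.filter (fun f => decide (pvRank.getD f ((pvRank.size : Int)) < (pvRank.size : Int))))
          (fun f => pvRank.getD f ((pvRank.size : Int))) :=
    pv_fold_eq_min (fun f => pvRank.getD f ((pvRank.size : Int))) ((pvRank.size : Int)) fams
  have hfil : fams.filter (fun f => decide (pvRank.getD f ((pvRank.size : Int)) < (pvRank.size : Int)))
      = fams.filter (fun f => decide (f ∈ pvPriorityA)) := by
    apply List.filter_congr
    intro x _
    rw [pv_rank_getD x, hsz]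
    by_cases hx : x ∈ pvPriorityA
    · have h1 : pvPriorityA.idxOf x < pvPriorityA.length := List.idxOf_lt_length_of_mem hx
      have h16 : pvPriorityA.length = 16 := by decide
      have h2 : (pvPriorityA.idxOf x : Int) < 16 := by omega
      simp [hx, h2]
    · simp [hx]
  have hkey : PySem.List.min? (fams.filter (fun f => decide (f ∈ pvPriorityA)))
        (fun f => pvRank.getD f ((pvRank.size : Int)))
      = PySem.List.min? (fams.filter (fun f => decide (f ∈ pvPriorityA)))
          (fun f => (pvPriorityA.idxOf f : Int)) := by
    apply pv_min?_key_congr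
    intro x hx
    have hxp : x ∈ pvPriorityA := by simpa using (List.mem_filter.mp hx).2
    rw [pv_rank_getD x, if_pos hxp]
  rw [hfold, hfil, hkey, ← pv_find_eq_min pvPriorityA fams (by decide)]

-- ===== VERDICT (by name: the statement is the Claim_ definition above) =====
theorem primary_family_py_spec : Claim_equal_primary_family_py := by
  intro pose _
  show primary_family_py pose = primary_family_py_alt pose
  exact pv_core (PySem.Dict.getD ⟨pose⟩ "movement_families" [])
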